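-- pv_equiv track=rewrite | github.com/DearSlim520/LeetCode | DP/2669-find-the-substring-with-maximum-cost/find-the-substring-with-maximum-cost.py | maximumCostSubstring
-- ===== SOURCE A (Python) =====
-- from typing import List
--
-- def maximumCostSubstring(s: str, chars: str, vals: List[int]) -> int:
--     # create a full list with all values
--     nums = []
--     for letter in s:
--         if letter not in chars:
--             nums.append(ord(letter) - ord('a') + 1)
--         else:
--             index = chars.index(letter)
--             nums.append(vals[index])
--
--     # dp
--     n = len(nums)
--     if n == 1: return max(nums[0], 0)
--     dp = [0] * (n + 1)
--     dp[1] = nums[0]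
--     globalMax = dp[1]
--
--     for i in range(2, n+1):
--         dp[i] = max(dp[i-1] + nums[i-1], nums[i-1])
--         globalMax = max(globalMax, dp[i])
--
--     return max(globalMax, 0)
-- ===== SOURCE B (Python) =====
-- def maximumCostSubstring(s, chars, vals):
--     # value table built once (first occurrence wins, like chars.index)
--     table = {}
--     for c, v in zip(chars, vals):
--         table.setdefault(c, v)
--
--     best = prefix = min_prefix = 0
--     for c in s:
--         prefix += table.get(c, ord(c) - ord('a') + 1)
--         min_prefix = min(min_prefix, prefix)
--         best = max(best, prefix - min_prefix)
--     return best
-- ===== Notes on version B (the rewrite author's own statement) =====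
-- stated objective: alternative
-- what changed: A dict of character values built once replaces A's per-character 'in chars'/chars.index scans, and a prefix-sum with a running minimum prefix replaces A's nums list plus Kadane dp array; it trades A's dp recurrence for the prefix-sum formulation of max-subarray.
import Mathlib
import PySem

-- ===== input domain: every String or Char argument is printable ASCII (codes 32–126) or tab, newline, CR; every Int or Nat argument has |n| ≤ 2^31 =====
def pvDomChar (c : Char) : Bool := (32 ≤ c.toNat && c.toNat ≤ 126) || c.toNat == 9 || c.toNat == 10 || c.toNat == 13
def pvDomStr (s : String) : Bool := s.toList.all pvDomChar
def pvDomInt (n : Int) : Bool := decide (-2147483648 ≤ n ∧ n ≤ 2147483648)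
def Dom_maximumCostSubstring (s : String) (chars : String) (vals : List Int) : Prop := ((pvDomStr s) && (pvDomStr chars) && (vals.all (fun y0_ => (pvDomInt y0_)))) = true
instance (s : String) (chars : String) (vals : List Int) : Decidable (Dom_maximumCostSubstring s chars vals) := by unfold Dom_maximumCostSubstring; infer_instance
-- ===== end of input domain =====

-- B replaces A's per-character chars.index scans and dp array by a value dict built once plus a prefix-sum/min-prefix scan (a different max-subarray formulation than A's Kadane recurrence).


-- ===== PORT A =====
def maximumCostSubstring (s : String) (chars : String) (vals : List Int) : Int :=
  -- create a full list with all values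
  let nums := s.toList.foldl (fun nums letter =>
    if !(chars.toList.contains letter) then
      nums ++ [((letter.toNat : Int) - 97 + 1)]
    else
      nums ++ [vals.getD (chars.toList.idxOf letter) 0]) []   -- vals[index]: in range on Pre_ (getD default unreachable there)
  -- dp
  let n := nums.length
  if n = 1 then max (nums.getD 0 0) 0
  else
    let dp := (List.replicate (n + 1) (0 : Int)).set 1 (nums.getD 0 0)  -- dp[1] = nums[0]: nums nonempty on Pre_
    let globalMax := nums.getD 0 0
    let res := (PySem.List.pyRange 2 ((n : Int) + 1) 1).foldl
      (fun (st : List Int × Int) i =>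
        let v := PySem.List.pyGetD st.1 (i - 1) 0 + PySem.List.pyGetD nums (i - 1) 0
        let dpi := max v (PySem.List.pyGetD nums (i - 1) 0)
        (st.1.set i.toNat dpi, max st.2 dpi)) (dp, globalMax)
    max res.2 0

-- ===== PORT B =====
def maximumCostSubstring_alt (s : String) (chars : String) (vals : List Int) : Int :=
  -- value table built once (setdefault: first occurrence wins, like chars.index)
  let table := (chars.toList.zip vals).foldl
    (fun (d : PySem.Dict Char Int) p => d.setdefault p.1 p.2) PySem.Dict.empty
  -- prefix-sum / min-prefix scan: best = max over (possibly empty) substrings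
  let r := s.toList.foldl
    (fun (st : Int × Int × Int) c =>
      let pr := st.2.1 + table.getD c ((c.toNat : Int) - 97 + 1)
      let mn := min st.2.2 pr
      (max st.1 (pr - mn), pr, mn)) (0, 0, 0)
  r.1

-- ===== PRECONDITION & SPEC =====
-- Pre_ excludes exactly the inputs where the Python A raises IndexError: empty s (nums[0]),
-- and a character of s found in chars at an index beyond the end of vals (vals[index]).
def Pre_maximumCostSubstring (s : String) (chars : String) (vals : List Int) : Prop :=
  s.toList ≠ [] ∧
    (s.toList.all (fun c => !(chars.toList.contains c) || decide (chars.toList.idxOf c < vals.length))) = true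
instance (s : String) (chars : String) (vals : List Int) : Decidable (Pre_maximumCostSubstring s chars vals) := by unfold Pre_maximumCostSubstring; infer_instance
def pvWitness_maximumCostSubstring : String × String × List Int := ("abcz!", "ab", [10, -5])

def Spec_maximumCostSubstring (s : String) (chars : String) (vals : List Int) (out : Int) : Prop := out = maximumCostSubstring_alt s chars vals
instance (s : String) (chars : String) (vals : List Int) (out : Int) : Decidable (Spec_maximumCostSubstring s chars vals out) := by unfold Spec_maximumCostSubstring; infer_instance

-- ===== CLAIM (what is proved, stated in full; the proofs are below) =====
def Claim_equal_maximumCostSubstring : Prop := ∀ (s : String) (chars : String) (vals : List Int), Dom_maximumCostSubstring s chars vals → Pre_maximumCostSubstring s chars vals → Spec_maximumCostSubstring s chars vals (maximumCostSubstring s chars vals)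
-- ===== LEMMAS AND PROOFS =====

-- value(c) as a mathematical function (used by the spec-side lemmas)
def pvCharVal (chars : String) (vals : List Int) (c : Char) : Int :=
  if chars.toList.contains c then vals.getD (chars.toList.idxOf c) 0
  else (c.toNat : Int) - 97 + 1

theorem getD1_set (l : List Int) (v : Int) (h : 1 < l.length) : (l.set 1 v)[1]?.getD 0 = v := by
  rw [List.getElem?_set_self h]; rfl

theorem maximumCostSubstring_witness_ok :
    Dom_maximumCostSubstring pvWitness_maximumCostSubstring.1 pvWitness_maximumCostSubstring.2.1 pvWitness_maximumCostSubstring.2.2 ∧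
    Pre_maximumCostSubstring pvWitness_maximumCostSubstring.1 pvWitness_maximumCostSubstring.2.1 pvWitness_maximumCostSubstring.2.2 := by
  decide

-- the dp loop of A, with the nums list and the dp array, equals a scalar Kadane fold over the tail
theorem dpLoop_eq_kadane (nums : List Int) :
    ∀ (d j : Nat) (dp : List Int) (cur g : Int),
    j + d = nums.length → 1 ≤ j → dp.length = nums.length + 1 →
    PySem.List.pyGetD dp (j : Int) 0 = cur →
    ((PySem.List.pyRange ((j : Int) + 1) ((nums.length : Int) + 1) 1).foldl
      (fun (st : List Int × Int) i =>
        let v := PySem.List.pyGetD st.1 (i - 1) 0 + PySem.List.pyGetD nums (i - 1) 0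
        let dpi := max v (PySem.List.pyGetD nums (i - 1) 0)
        (st.1.set i.toNat dpi, max st.2 dpi)) (dp, g)).2
    = ((nums.drop j).foldl (fun (st : Int × Int) v =>
        let cur := max (st.1 + v) v
        (cur, max st.2 cur)) (cur, g)).2 := by
  intro d
  induction d with
  | zero =>
    intro j dp cur g hj _ _ _
    have hjn : j = nums.length := by omega
    subst hjn
    rw [PySem.List.pyRange_one_eq_nil (by omega), List.drop_length]
    simp
  | succ d ih =>
    intro j dp cur g hj hj1 hdp hcur
    have hjlt : j < nums.length := by omega
    rw [PySem.List.pyRange_one_cons (by omega)]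
    have hdrop : nums.drop j = nums[j] :: nums.drop (j + 1) := List.drop_eq_getElem_cons hjlt
    rw [hdrop]
    simp only [List.foldl_cons]
    have hnumsj : PySem.List.pyGetD nums ((j : Int) + 1 - 1) 0 = nums[j] := by
      have : (j : Int) + 1 - 1 = (j : Int) := by ring
      rw [this, PySem.List.pyGetD_natCast]
      simp [List.getD, hjlt]
    have hdpj : PySem.List.pyGetD dp ((j : Int) + 1 - 1) 0 = cur := by
      have : (j : Int) + 1 - 1 = (j : Int) := by ring
      rw [this, hcur]
    rw [hnumsj, hdpj]
    have htn : ((j : Int) + 1).toNat = j + 1 := by omega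
    rw [htn]
    have := ih (j + 1) (dp.set (j + 1) (max (cur + nums[j]) nums[j]))
      (max (cur + nums[j]) nums[j]) (max g (max (cur + nums[j]) nums[j]))
      (by omega) (by omega) (by simpa using hdp)
      (by
        rw [PySem.List.pyGetD_natCast]
        have hlt : j + 1 < dp.length := by omega
        simp [List.getD, hlt])
    push_cast at this ⊢
    exact this

theorem nums_eq_map (s : String) (chars : String) (vals : List Int) :
    (s.toList.foldl (fun nums letter =>
      if !(chars.toList.contains letter) then
        nums ++ [((letter.toNat : Int) - 97 + 1)]
      else
        nums ++ [vals.getD (chars.toList.idxOf letter) 0]) [])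
    = s.toList.map (pvCharVal chars vals) := by
  have h : ∀ (acc : List Int) (x : Char),
      (if !(chars.toList.contains x) then acc ++ [((x.toNat : Int) - 97 + 1)]
       else acc ++ [vals.getD (chars.toList.idxOf x) 0])
      = acc ++ [pvCharVal chars vals x] := by
    intro acc x
    unfold pvCharVal
    by_cases hx : x ∈ chars.toList <;> simp [hx]
  calc (s.toList.foldl (fun nums letter =>
      if !(chars.toList.contains letter) then
        nums ++ [((letter.toNat : Int) - 97 + 1)]
      else
        nums ++ [vals.getD (chars.toList.idxOf letter) 0]) [])
      = s.toList.foldl (fun acc x => acc ++ [pvCharVal chars vals x]) [] := by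
        exact PySem.List.foldl_congr_mem _ _ _ _ (fun acc x _ => h acc x)
    _ = s.toList.map (pvCharVal chars vals) := by
        simpa using PySem.List.foldl_append_singleton_eq_map (f := pvCharVal chars vals) s.toList []

-- setdefault fold: the dict built from pairs answers with the FIRST pair whose key matches
theorem setdefault_eq (d : PySem.Dict Char Int) (k : Char) (v : Int) :
    d.setdefault k v = if d.contains k then d else d.insert k v := by
  unfold PySem.Dict.setdefault
  split_ifs with h
  · rfl
  · apply PySem.Dict.ext
    rw [PySem.Dict.items_insert]
    simp [h]

theorem setdefault_fold_get? (l : List (Char × Int)) :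
    ∀ (d : PySem.Dict Char Int) (c : Char),
    (l.foldl (fun d p => d.setdefault p.1 p.2) d).get? c =
      match d.get? c with
      | some v => some v
      | none => (l.find? (fun p => p.1 == c)).map Prod.snd := by
  induction l with
  | nil => intro d c; cases h : d.get? c <;> simp [h]
  | cons a t ih =>
    intro d c
    rw [List.foldl_cons,
      show d.setdefault a.1 a.2 = if d.contains a.1 then d else d.insert a.1 a.2 from
        setdefault_eq d a.1 a.2]
    by_cases hk : d.contains a.1 = true
    · rw [if_pos hk, ih]
      cases h : d.get? c with
      | some v => simp
      | none =>
        have hne : ¬ (a.1 == c) = true := by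
          intro he
          have : a.1 = c := by simpa using he
          subst this
          rw [PySem.Dict.contains_eq_isSome_get?, h] at hk
          simp at hk
        simp [hne]
    · rw [if_neg hk, ih]
      rw [PySem.Dict.get?_insert]
      by_cases hc : c = a.1
      · subst hc
        have hdc : d.get? a.1 = none := by
          rw [PySem.Dict.contains_eq_isSome_get?] at hk
          cases h : d.get? a.1 with
          | none => rfl
          | some v => rw [h] at hk; simp at hk
        simp [hdc]
      · have hne : ¬ (a.1 == c) = true := by simpa using fun h => hc h.symm
        simp only [if_neg hc]
        cases h : d.get? c with
        | some v => simp
        | none => simp [hne]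

theorem find?_zip_of_idx (c : Char) :
    ∀ (chars : List Char) (vals : List Int), c ∈ chars → chars.idxOf c < vals.length →
    ((chars.zip vals).find? (fun p => p.1 == c)) = some (c, vals.getD (chars.idxOf c) 0) := by
  intro chars
  induction chars with
  | nil => intro vals hc; simp at hc
  | cons a t ih =>
    intro vals hc hlt
    by_cases hac : a = c
    · subst hac
      have h0 : List.idxOf a (a :: t) = 0 := by simp
      have hvne : vals ≠ [] := by
        intro hv; rw [hv, h0] at hlt; simp at hlt
      obtain ⟨w, vt, rfl⟩ := List.exists_cons_of_ne_nil hvne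
      simp [h0]
    · have hct : c ∈ t := by
        cases List.mem_cons.mp hc with
        | inl h => exact absurd h.symm hac
        | inr h => exact h
      have hidx : List.idxOf c (a :: t) = List.idxOf c t + 1 := by
        simp [hac]
      rw [hidx] at hlt
      have hvne : vals ≠ [] := by intro hv; rw [hv] at hlt; simp at hlt
      obtain ⟨w, vt, rfl⟩ := List.exists_cons_of_ne_nil hvne
      have hne : ¬ (a == c) = true := by simpa using hac
      simp only [List.zip_cons_cons, List.find?_cons, hne]
      rw [ih vt hct (by simpa using hlt)]
      simp [hidx]

theorem find?_zip_none (c : Char) (chars : List Char) (vals : List Int) (hc : c ∉ chars) :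
    ((chars.zip vals).find? (fun p => p.1 == c)) = none := by
  apply List.find?_eq_none.mpr
  intro p hp
  have := (List.of_mem_zip hp).1
  simp only [beq_iff_eq]
  intro h
  exact hc (h ▸ this)

theorem table_getD (chars : String) (vals : List Int) (c : Char)
    (h : chars.toList.contains c = true → chars.toList.idxOf c < vals.length) :
    ((chars.toList.zip vals).foldl (fun d p => d.setdefault p.1 p.2) PySem.Dict.empty).getD c
      ((c.toNat : Int) - 97 + 1) = pvCharVal chars vals c := by
  rw [PySem.Dict.getD_eq_get?_getD, setdefault_fold_get?]
  simp only [PySem.Dict.get?_empty]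
  unfold pvCharVal
  by_cases hc : c ∈ chars.toList
  · rw [find?_zip_of_idx c chars.toList vals hc (h (by simpa using hc))]
    simp [hc]
  · rw [find?_zip_none c chars.toList vals hc]
    simp [hc]

-- prefix-sum/min-prefix scan equals (Kadane result) ⊔ 0, given the state invariant
theorem kadane_vs_prefix (l : List Int) :
    ∀ (cur g best p m : Int), p - m = max cur 0 → best = max g 0 →
    (l.foldl (fun (st : Int × Int × Int) v =>
        let pr := st.2.1 + v
        let mn := min st.2.2 pr
        (max st.1 (pr - mn), pr, mn)) (best, p, m)).1
    = max ((l.foldl (fun (st : Int × Int) v =>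
        let cur := max (st.1 + v) v
        (cur, max st.2 cur)) (cur, g)).2) 0 := by
  induction l with
  | nil => intro cur g best p m h1 h2; simpa using h2
  | cons v t ih =>
    intro cur g best p m h1 h2
    simp only [List.foldl_cons]
    exact ih (max (cur + v) v) (max g (max (cur + v) v))
      (max best (p + v - min m (p + v))) (p + v) (min m (p + v))
      (by omega) (by omega)

-- ===== VERDICT (by name: the statement is the Claim_ definition above) =====
theorem maximumCostSubstring_spec : Claim_equal_maximumCostSubstring := by
  intro s chars vals _hdom hpre
  unfold Spec_maximumCostSubstring
  obtain ⟨hne, hall⟩ := hpre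
  -- B's fold computes pvCharVal on every character of s
  have hstep : s.toList.foldl
      (fun (st : Int × Int × Int) c =>
        let pr := st.2.1 + ((chars.toList.zip vals).foldl (fun d p => d.setdefault p.1 p.2)
            PySem.Dict.empty).getD c ((c.toNat : Int) - 97 + 1)
        let mn := min st.2.2 pr
        (max st.1 (pr - mn), pr, mn)) (0, 0, 0)
      = (s.toList.map (pvCharVal chars vals)).foldl
        (fun (st : Int × Int × Int) v =>
          let pr := st.2.1 + v
          let mn := min st.2.2 pr
          (max st.1 (pr - mn), pr, mn)) (0, 0, 0) := by
    rw [List.foldl_map]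
    apply PySem.List.foldl_congr_mem
    intro st c hc
    have hcpre : chars.toList.contains c = true → chars.toList.idxOf c < vals.length := by
      intro hin
      have h2 := List.all_eq_true.mp hall c hc
      simp only [Bool.or_eq_true, Bool.not_eq_true', decide_eq_true_eq] at h2
      rcases h2 with h2 | h2
      · rw [hin] at h2; cases h2
      · exact h2
    rw [table_getD chars vals c hcpre]
  have hBr : maximumCostSubstring_alt s chars vals
      = ((s.toList.map (pvCharVal chars vals)).foldl
        (fun (st : Int × Int × Int) v =>
          let pr := st.2.1 + v
          let mn := min st.2.2 pr
          (max st.1 (pr - mn), pr, mn)) (0, 0, 0)).1 := by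
    unfold maximumCostSubstring_alt
    exact congrArg Prod.fst hstep
  rw [hBr]
  unfold maximumCostSubstring
  rw [nums_eq_map]
  obtain ⟨c, rest, hL⟩ := List.exists_cons_of_ne_nil hne
  rw [hL]
  set f := pvCharVal chars vals with hf
  simp only [List.map_cons, List.foldl_cons]
  have hkvp := kadane_vs_prefix (rest.map f) (f c) (f c)
    (max 0 (0 + f c - min 0 (0 + f c))) (0 + f c) (min 0 (0 + f c))
    (by omega) (by omega)
  by_cases hrest : rest = []
  · subst hrest
    simp only [List.map_nil]
    rw [if_pos (by simp)]
    simp only [List.foldl_nil, List.getD, List.getElem?_cons_zero, Option.getD_some]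
    omega
  · have hn1 : ¬ ((f c :: List.map f rest).length = 1) := by
      have := List.length_pos_iff.mpr hrest
      simp
      omega
    rw [if_neg hn1]
    set nums := f c :: List.map f rest with hnums
    have hkad := dpLoop_eq_kadane nums rest.length 1
      ((List.replicate (nums.length + 1) (0 : Int)).set 1 (nums.getD 0 0))
      (nums.getD 0 0) (nums.getD 0 0)
      (by simp [hnums, Nat.add_comm]) (le_refl 1) (by simp)
      (by
        rw [show ((1 : Nat) : Int) = (1 : Int) by norm_num]
        rw [show (1 : Int) = ((1 : Nat) : Int) by norm_num, PySem.List.pyGetD_natCast]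
        have hlt : 1 < (List.replicate (nums.length + 1) (0 : Int)).length := by
          simp [hnums]
        simpa [List.getD] using getD1_set _ (nums.getD 0 0) hlt)
    simp only [Nat.cast_one] at hkad
    rw [show ((1:ℤ) + 1) = 2 from by norm_num] at hkad
    rw [hkad]
    have hdrop : nums.drop 1 = List.map f rest := by simp [hnums]
    have hget0 : nums.getD 0 0 = f c := by simp [hnums]
    rw [hdrop, hget0]
    rw [hkvp]
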